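-- pv_equiv track=rewrite | github.com/OmniNode-ai/omnibase | src/omnibase/core/function_discovery.py | _extract_bash_inputs
-- ===== SOURCE A (Python) =====
-- from typing import Dict, List, Optional
--
-- def _extract_bash_inputs(comments: Optional[str]) -> List[str]:
--     """Extract input parameters from comments."""
--     if not comments:
--         return []
--
--     inputs = []
--     for line in comments.split("\n"):
--         line = line.strip().lstrip("#").strip()
--         if line.startswith("@param"):
--             parts = line.split(maxsplit=2)
--             if len(parts) >= 2:
--                 inputs.append(f"{parts[1]}: string")
--
--     return inputs
-- ===== SOURCE B (Python) =====
-- from typing import Dict, List, Optional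
--
--
-- def _skip_while(s, i, pred):
--     while i < len(s) and pred(s[i]):
--         i += 1
--     return i
--
--
-- def _parse_param(line):
--     """Single left-to-right scan of one line: skip whitespace, a contiguous
--     '#' run, whitespace; require a token starting with '@param'; skip it and
--     the following whitespace; the next token (if any) is the name."""
--     i = _skip_while(line, 0, str.isspace)
--     i = _skip_while(line, i, lambda c: c == '#')
--     i = _skip_while(line, i, str.isspace)
--     if not line.startswith('@param', i):
--         return None
--     i = _skip_while(line, i, lambda c: not c.isspace())
--     i = _skip_while(line, i, str.isspace)
--     k = _skip_while(line, i, lambda c: not c.isspace())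
--     if k == i:
--         return None
--     return line[i:k]
--
--
-- def _extract_bash_inputs(comments: Optional[str]) -> List[str]:
--     if not comments:
--         return []
--     results = []
--     for line in comments.split("\n"):
--         name = _parse_param(line)
--         if name is not None:
--             results.append(f"{name}: string")
--     return results
-- ===== Notes on version B (the rewrite author's own statement) =====
-- stated objective: alternative
-- what changed: A builds per-line intermediate strings (strip, lstrip of the comment marker, strip, split with maxsplit) and indexes the split result, while B does a single left-to-right character scan of each line (skip whitespace, the comment-marker run, whitespace, the param-tag token, whitespace, then take the next token) with no intermediate string construction.
import Mathlib
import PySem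

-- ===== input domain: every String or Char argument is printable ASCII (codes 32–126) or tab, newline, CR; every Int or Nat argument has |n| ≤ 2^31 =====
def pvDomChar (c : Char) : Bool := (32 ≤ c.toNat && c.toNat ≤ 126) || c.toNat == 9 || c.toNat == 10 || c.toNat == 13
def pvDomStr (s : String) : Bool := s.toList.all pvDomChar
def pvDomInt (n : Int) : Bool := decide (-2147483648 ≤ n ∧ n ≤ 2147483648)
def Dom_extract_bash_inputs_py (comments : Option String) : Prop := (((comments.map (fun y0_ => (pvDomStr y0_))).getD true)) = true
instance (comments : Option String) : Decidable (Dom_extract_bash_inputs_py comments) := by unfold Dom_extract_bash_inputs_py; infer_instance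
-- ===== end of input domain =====

-- B replaces A's per-line strip/lstrip/strip/split pipeline by one left-to-right character scan per line (objective: alternative).

-- ===== PORT A =====
def extract_bash_inputs_py (comments : Option String) : List String :=
  match comments with
  | none => []
  | some c =>
    if c = "" then []      -- `if not comments: return []` (None handled by the match above)
    else
      -- comments.split("\n"); the separator "\n" is non-empty so split? is always `some`
      ((PySem.Str.split? c "\n").getD []).foldl (fun inputs line =>
        let line1 := PySem.Str.strip line
        -- line.lstrip("#") ported by hand: drop the leading contiguous run of '#' (exact for the one-char strip set "#")
        let line2 := String.ofList (line1.toList.dropWhile (fun ch => ch == '#'))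
        let line3 := PySem.Str.strip line2
        if PySem.Str.startswith line3 "@param" then
          match PySem.Str.split₀Max line3 2 with
          | _ :: p1 :: _ => inputs ++ [p1 ++ ": string"]   -- len(parts) >= 2: parts[1]
          | _ => inputs
        else inputs) []

-- ===== PORT B =====
-- Source B's `_parse_param`: each `while`/`_skip_while` over an advancing index becomes the
-- corresponding dropWhile on the remaining suffix; `line[i:k]` becomes the takeWhile of the suffix.
def parseParamName (line : List Char) : Option (List Char) :=
  let r1 := line.dropWhile PySem.Chars.isspace
  let r2 := r1.dropWhile (fun ch => ch == '#')
  let r3 := r2.dropWhile PySem.Chars.isspace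
  if PySem.Chars.startswith r3 "@param".toList then
    let r4 := r3.dropWhile (fun c => !PySem.Chars.isspace c)
    let r5 := r4.dropWhile PySem.Chars.isspace
    let name := r5.takeWhile (fun c => !PySem.Chars.isspace c)
    if name.isEmpty then none else some name
  else none

def extract_bash_inputs_py_alt (comments : Option String) : List String :=
  match comments with
  | none => []
  | some c =>
    if c = "" then []
    else
      ((PySem.Str.split? c "\n").getD []).filterMap (fun line =>
        (parseParamName line.toList).map (fun name => String.ofList name ++ ": string"))

-- ===== PRECONDITION & SPEC =====
def Spec_extract_bash_inputs_py (comments : Option String) (out : List String) : Prop := out = extract_bash_inputs_py_alt comments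
instance (comments : Option String) (out : List String) : Decidable (Spec_extract_bash_inputs_py comments out) := by unfold Spec_extract_bash_inputs_py; infer_instance

-- ===== CLAIM (what is proved, stated in full; the proofs are below) =====
def Claim_equal_extract_bash_inputs_py : Prop := ∀ (comments : Option String), Dom_extract_bash_inputs_py comments → Spec_extract_bash_inputs_py comments (extract_bash_inputs_py comments)

-- ===== LEMMAS AND PROOFS =====

-- A's per-line computation, on the character-list side (proof helper).
def aName (l : List Char) : Option (List Char) :=
  let l3 := PySem.Chars.strip ((PySem.Chars.strip l).dropWhile (fun ch => ch == '#'))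
  if PySem.Chars.startswith l3 "@param".toList then
    match PySem.Chars.split₀Max l3 2 with
    | _ :: p1 :: _ => some p1
    | _ => none
  else none

lemma rstrip_suffix_eq {x v : List Char} (h : v <:+ PySem.Chars.rstrip x) :
    PySem.Chars.rstrip v = v := by
  rcases eq_or_ne v [] with rfl | hv
  · rfl
  · have hpre : v.reverse <+: List.dropWhile PySem.Chars.isspace x.reverse := by
      have h2 := List.reverse_prefix.mpr h
      simpa [PySem.Chars.rstrip] using h2
    have hvr : v.reverse ≠ [] := by simpa using hv
    have hd : List.dropWhile PySem.Chars.isspace x.reverse ≠ [] := by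
      intro h0; rw [h0] at hpre; simp_all [List.prefix_nil]
    have hhead : v.reverse.head hvr = (List.dropWhile PySem.Chars.isspace x.reverse).head hd := by
      have := hpre.getElem (i := 0) (by simpa using List.length_pos_iff.mpr hvr)
      simpa [List.head_eq_getElem] using this
    have hns : PySem.Chars.isspace (v.reverse.head hvr) = false := by
      rw [hhead]; exact List.head_dropWhile_not _ hd
    have : List.dropWhile PySem.Chars.isspace v.reverse = v.reverse := by
      rw [List.dropWhile_eq_self_iff]
      intro hl
      rw [← List.head_eq_getElem hvr]
      have hns' : PySem.Chars.isspace (v.getLast hv) = false := by simpa using hns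
      simp [hns']
    simp [PySem.Chars.rstrip, this]

lemma dropWhile_allp {p : Char → Bool} {t : List Char} (h : ∀ c ∈ t, p c = false) :
    t.dropWhile p = t := by
  rw [List.dropWhile_eq_self_iff]
  intro hl
  simp [h _ (t.getElem_mem hl)]

lemma rstrip_decomp (l : List Char) :
    l = PySem.Chars.rstrip l ++ (l.reverse.takeWhile PySem.Chars.isspace).reverse ∧
      ∀ c ∈ (l.reverse.takeWhile PySem.Chars.isspace).reverse, PySem.Chars.isspace c = true := by
  constructor
  · conv_lhs => rw [← l.reverse_reverse, ← List.takeWhile_append_dropWhile (p := PySem.Chars.isspace) (l := l.reverse)]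
    rw [List.reverse_append]
    rfl
  · intro c hc
    exact List.mem_takeWhile_imp (List.mem_reverse.mp hc)

lemma prefix_append_allsp {pat w t : List Char}
    (hp : ∀ c ∈ pat, PySem.Chars.isspace c = false)
    (ht : ∀ c ∈ t, PySem.Chars.isspace c = true) :
    pat.isPrefixOf (w ++ t) = pat.isPrefixOf w := by
  by_cases hw : pat <+: w
  · rw [Bool.eq_iff_iff]
    simp [List.isPrefixOf_iff_prefix, hw, hw.trans (List.prefix_append w t)]
  · have hwt : ¬ pat <+: (w ++ t) := by
      intro h1
      rcases le_or_gt pat.length w.length with hle | hgt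
      · exact hw (by
          rw [List.prefix_iff_eq_take] at h1 ⊢
          rwa [List.take_append_of_le_length hle] at h1)
      · rw [List.prefix_iff_eq_take, List.take_append, List.take_of_length_le (le_of_lt hgt)] at h1
        have ht0 : t ≠ [] := by
          intro h0
          rw [h0] at h1; simp at h1
          rw [h1] at hgt; simp at hgt
        have htl : 0 < t.length := List.length_pos_iff.mpr ht0
        have hmem : t[0]'htl ∈ pat := by
          rw [h1]
          refine List.mem_append_right _ ?_
          have h0 : (t.take (pat.length - w.length))[0]'(by simp; omega) = t[0]'htl := by
            simp
          rw [← h0]; exact List.getElem_mem _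
        have := hp _ hmem
        simp [ht _ (List.getElem_mem _)] at this
    rw [Bool.eq_iff_iff]
    simp [List.isPrefixOf_iff_prefix, hw, hwt]

lemma go_succ (fuel m : Nat) (l : List Char) (acc : List (List Char)) :
    PySem.Chars.split₀Max.go (fuel+1) m l acc =
      (if (l.dropWhile PySem.Chars.isspace).isEmpty then acc.reverse
       else if m = 0 then (l.dropWhile PySem.Chars.isspace :: acc).reverse
       else PySem.Chars.split₀Max.go fuel (m-1)
              ((l.dropWhile PySem.Chars.isspace).dropWhile (fun c => !PySem.Chars.isspace c))
              ((l.dropWhile PySem.Chars.isspace).takeWhile (fun c => !PySem.Chars.isspace c) :: acc)) := by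
  cases h : l.dropWhile PySem.Chars.isspace with
  | nil => simp [PySem.Chars.split₀Max.go, h]
  | cons a as => by_cases hm : m = 0 <;> simp [PySem.Chars.split₀Max.go, h, hm]

lemma takeWhile_allfalse {p : Char → Bool} {t : List Char} (h : ∀ c ∈ t, p c = false) :
    t.takeWhile p = [] := by
  cases t with
  | nil => rfl
  | cons c cs => simp [h c (by simp)]

lemma hash_false_of_sp {c : Char} (h : PySem.Chars.isspace c = true) : (c == '#') = false := by
  cases hbe : (c == '#') with
  | false => rfl
  | true =>
    have hc : c = '#' := by simpa using hbe
    rw [hc] at h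
    exact absurd h (by decide)

lemma pat_ns : ∀ c ∈ ("@param".toList), PySem.Chars.isspace c = false := by
  intro c hc
  rw [show "@param".toList = ['@','p','a','r','a','m'] from rfl] at hc
  simp only [List.mem_cons, List.not_mem_nil, or_false] at hc
  rcases hc with rfl | rfl | rfl | rfl | rfl | rfl <;> rfl

lemma core (y t : List Char) (hy : PySem.Chars.rstrip y = y)
    (htsp : ∀ c ∈ t, PySem.Chars.isspace c = true) :
    (if PySem.Chars.startswith (PySem.Chars.strip (y.dropWhile (fun ch => ch == '#'))) "@param".toList then
       match PySem.Chars.split₀Max (PySem.Chars.strip (y.dropWhile (fun ch => ch == '#'))) 2 with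
       | _ :: p1 :: _ => some p1 | _ => none
     else none)
    =
    (let r2 := ((y ++ t).dropWhile (fun ch => ch == '#'))
     let r3 := r2.dropWhile PySem.Chars.isspace
     if PySem.Chars.startswith r3 "@param".toList then
       let r4 := r3.dropWhile (fun c => !PySem.Chars.isspace c)
       let r5 := r4.dropWhile PySem.Chars.isspace
       let name := r5.takeWhile (fun c => !PySem.Chars.isspace c)
       if name.isEmpty then none else some name
     else none) := by
  have htns : ∀ c ∈ t, (fun c => !PySem.Chars.isspace c) c = false := by
    intro c hc; simp [htsp c hc]
  have hthash : ∀ c ∈ t, (fun ch => ch == '#') c = false := fun c hc => hash_false_of_sp (htsp c hc)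
  have htspnil : t.dropWhile PySem.Chars.isspace = [] := List.dropWhile_eq_nil_iff.mpr htsp
  by_cases hz : y.dropWhile (fun ch => ch == '#') = []
  · have hr2 : (y ++ t).dropWhile (fun ch => ch == '#') = t := by
      rw [List.dropWhile_append, hz]
      simp [dropWhile_allp hthash]
    rw [hz]
    simp only [hr2, htspnil]
    rfl
  · have hrz : PySem.Chars.rstrip (y.dropWhile (fun ch => ch == '#')) = y.dropWhile (fun ch => ch == '#') :=
      rstrip_suffix_eq (x := y) (by rw [hy]; exact List.dropWhile_suffix _)
    have hw' : (y.dropWhile (fun ch => ch == '#')).dropWhile PySem.Chars.isspace ≠ [] := by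
      intro hw0
      have hallsp := List.dropWhile_eq_nil_iff.mp hw0
      have hnil : PySem.Chars.rstrip (y.dropWhile (fun ch => ch == '#')) = [] := by
        unfold PySem.Chars.rstrip
        rw [List.dropWhile_eq_nil_iff.mpr (by intro c hc; exact hallsp c (List.mem_reverse.mp hc))]
        rfl
      exact hz (hrz ▸ hnil)
    have hstripz : PySem.Chars.strip (y.dropWhile (fun ch => ch == '#')) =
        (y.dropWhile (fun ch => ch == '#')).dropWhile PySem.Chars.isspace := by
      show PySem.Chars.rstrip _ = _
      exact rstrip_suffix_eq (x := y)
        (by rw [hy]; exact (List.dropWhile_suffix _).trans (List.dropWhile_suffix _))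
    have hr2 : (y ++ t).dropWhile (fun ch => ch == '#') = y.dropWhile (fun ch => ch == '#') ++ t := by
      rw [List.dropWhile_append]
      simp [hz]
    have hr3 : (y.dropWhile (fun ch => ch == '#') ++ t).dropWhile PySem.Chars.isspace =
        (y.dropWhile (fun ch => ch == '#')).dropWhile PySem.Chars.isspace ++ t := by
      rw [List.dropWhile_append]
      simp [hw']
    simp only [hr2, hr3, hstripz]
    generalize hwg : (y.dropWhile (fun ch => ch == '#')).dropWhile PySem.Chars.isspace = w at *
    have hdw : w.dropWhile PySem.Chars.isspace = w := by
      rw [← hwg]; exact List.dropWhile_idempotent _ _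
    have hpref : PySem.Chars.startswith (w ++ t) "@param".toList = PySem.Chars.startswith w "@param".toList :=
      prefix_append_allsp pat_ns htsp
    rw [hpref]
    by_cases hsw : PySem.Chars.startswith w "@param".toList = true
    · simp only [hsw, if_true]
      have hwle : 6 ≤ w.length := by
        have := List.isPrefixOf_iff_prefix.mp hsw
        simpa using this.length_le
      obtain ⟨k, hk⟩ : ∃ k, w.length = k + 6 := ⟨w.length - 6, by omega⟩
      have hsplit0 : PySem.Chars.split₀Max w 2 = PySem.Chars.split₀Max.go (w.length + 1) 2 w [] := by
        rw [PySem.Chars.split₀Max]; simp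
      have hstep1 : PySem.Chars.split₀Max.go (w.length + 1) 2 w [] =
          PySem.Chars.split₀Max.go (k+5+1) 1 (w.dropWhile (fun c => !PySem.Chars.isspace c))
            [w.takeWhile (fun c => !PySem.Chars.isspace c)] := by
        rw [hk, go_succ, hdw]
        simp [List.isEmpty_iff, hw']
      have hr4 : (w ++ t).dropWhile (fun c => !PySem.Chars.isspace c) =
          (if (w.dropWhile (fun c => !PySem.Chars.isspace c)).isEmpty then t
           else w.dropWhile (fun c => !PySem.Chars.isspace c) ++ t) := by
        rw [List.dropWhile_append]
        by_cases h0 : (w.dropWhile (fun c => !PySem.Chars.isspace c)) = [] <;>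
          simp [h0, dropWhile_allp htns]
      rw [hsplit0, hstep1, hr4]
      by_cases hd : (w.dropWhile (fun c => !PySem.Chars.isspace c)).dropWhile PySem.Chars.isspace = []
      · have hAnone : PySem.Chars.split₀Max.go (k+5+1) 1 (w.dropWhile (fun c => !PySem.Chars.isspace c))
            [w.takeWhile (fun c => !PySem.Chars.isspace c)] =
            [w.takeWhile (fun c => !PySem.Chars.isspace c)] := by
          rw [go_succ]
          simp [List.isEmpty_iff, hd]
        rw [hAnone]
        by_cases h0 : (w.dropWhile (fun c => !PySem.Chars.isspace c)) = []
        · simp [h0, htspnil]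
        · have hr5 : ((w.dropWhile (fun c => !PySem.Chars.isspace c)) ++ t).dropWhile PySem.Chars.isspace = [] := by
            rw [List.dropWhile_append, hd]
            simp [htspnil]
          simp only [h0, List.isEmpty_cons]
          simp [h0, hr5]
      · have hr1A' : (w.dropWhile (fun c => !PySem.Chars.isspace c)) ≠ [] := by
          intro h0; rw [h0] at hd; exact hd rfl
        have hAres : PySem.Chars.split₀Max.go (k+5+1) 1 (w.dropWhile (fun c => !PySem.Chars.isspace c))
            [w.takeWhile (fun c => !PySem.Chars.isspace c)] =
            (if (((((w.dropWhile (fun c => !PySem.Chars.isspace c)).dropWhile PySem.Chars.isspace).dropWhile (fun c => !PySem.Chars.isspace c)).dropWhile PySem.Chars.isspace)).isEmpty then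
              [w.takeWhile (fun c => !PySem.Chars.isspace c),
               ((w.dropWhile (fun c => !PySem.Chars.isspace c)).dropWhile PySem.Chars.isspace).takeWhile (fun c => !PySem.Chars.isspace c)]
             else
              [w.takeWhile (fun c => !PySem.Chars.isspace c),
               ((w.dropWhile (fun c => !PySem.Chars.isspace c)).dropWhile PySem.Chars.isspace).takeWhile (fun c => !PySem.Chars.isspace c),
               ((((w.dropWhile (fun c => !PySem.Chars.isspace c)).dropWhile PySem.Chars.isspace).dropWhile (fun c => !PySem.Chars.isspace c)).dropWhile PySem.Chars.isspace)]) := by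
          rw [go_succ]
          simp only [List.isEmpty_iff, hd, if_false]
          rw [go_succ]
          by_cases he : ((((w.dropWhile (fun c => !PySem.Chars.isspace c)).dropWhile PySem.Chars.isspace).dropWhile (fun c => !PySem.Chars.isspace c)).dropWhile PySem.Chars.isspace) = []
          · simp [List.isEmpty_iff, he]
          · simp [List.isEmpty_iff, he]
        rw [hAres]
        have hr5 : ((if ((w.dropWhile (fun c => !PySem.Chars.isspace c))).isEmpty then t
             else (w.dropWhile (fun c => !PySem.Chars.isspace c)) ++ t)).dropWhile PySem.Chars.isspace =
            ((w.dropWhile (fun c => !PySem.Chars.isspace c)).dropWhile PySem.Chars.isspace) ++ t := by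
          simp only [List.isEmpty_iff, hr1A']
          rw [if_neg (by simpa [List.isEmpty_iff] using hr1A')]
          rw [List.dropWhile_append]
          simp [hd]
        rw [hr5]
        have hname : (((w.dropWhile (fun c => !PySem.Chars.isspace c)).dropWhile PySem.Chars.isspace) ++ t).takeWhile (fun c => !PySem.Chars.isspace c) =
            ((w.dropWhile (fun c => !PySem.Chars.isspace c)).dropWhile PySem.Chars.isspace).takeWhile (fun c => !PySem.Chars.isspace c) := by
          rw [List.takeWhile_append]
          by_cases hlen : ((((w.dropWhile (fun c => !PySem.Chars.isspace c)).dropWhile PySem.Chars.isspace)).takeWhile (fun c => !PySem.Chars.isspace c)).length = (((w.dropWhile (fun c => !PySem.Chars.isspace c)).dropWhile PySem.Chars.isspace)).length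
          · rw [if_pos hlen, takeWhile_allfalse htns]
            rw [(List.takeWhile_prefix _).eq_of_length hlen]
            simp
          · rw [if_neg hlen]
        rw [hname]
        obtain ⟨c, ds, hcds⟩ := List.exists_cons_of_ne_nil hd
        have hcns : PySem.Chars.isspace c = false := by
          have h1 := List.head_dropWhile_not PySem.Chars.isspace (l := (w.dropWhile (fun c => !PySem.Chars.isspace c))) hd
          simp only [hcds, List.head_cons] at h1
          exact h1
        rw [hcds]
        simp only [List.takeWhile_cons, hcns, Bool.not_false, if_true]
        split_ifs <;> simp_all
    · simp only [hsw]
      simp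

theorem aName_eq (l : List Char) : aName l = parseParamName l := by
  obtain ⟨hu0, htsp⟩ := rstrip_decomp (l.dropWhile PySem.Chars.isspace)
  have hy : PySem.Chars.rstrip (PySem.Chars.rstrip (l.dropWhile PySem.Chars.isspace)) =
      PySem.Chars.rstrip (l.dropWhile PySem.Chars.isspace) :=
    rstrip_suffix_eq (x := l.dropWhile PySem.Chars.isspace) List.suffix_rfl
  have hcore := core (PySem.Chars.rstrip (l.dropWhile PySem.Chars.isspace))
    (((l.dropWhile PySem.Chars.isspace).reverse.takeWhile PySem.Chars.isspace).reverse) hy htsp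
  unfold aName parseParamName
  conv_rhs => rw [hu0]
  exact hcore

lemma foldl_opt_toList (f : String → Option String) (lines : List String) (acc : List String) :
    lines.foldl (fun inputs line => inputs ++ (f line).toList) acc = acc ++ lines.filterMap f := by
  induction lines generalizing acc with
  | nil => simp
  | cons x xs ih => cases h : f x <;> simp [List.foldl, h, ih]

lemma stepA (inputs : List String) (line : String) :
    (let line1 := PySem.Str.strip line
     let line2 := String.ofList (line1.toList.dropWhile (fun ch => ch == '#'))
     let line3 := PySem.Str.strip line2
     if PySem.Str.startswith line3 "@param" then
       match PySem.Str.split₀Max line3 2 with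
       | _ :: p1 :: _ => inputs ++ [p1 ++ ": string"]
       | _ => inputs
     else inputs)
    = inputs ++ ((aName line.toList).map (fun n => String.ofList n ++ ": string")).toList := by
  simp only [aName]
  have h3 : (PySem.Str.strip (String.ofList ((PySem.Str.strip line).toList.dropWhile (fun ch => ch == '#')))).toList
      = PySem.Chars.strip ((PySem.Chars.strip line.toList).dropWhile (fun ch => ch == '#')) := by
    simp
  rw [PySem.Str.startswith_eq]
  rw [h3]
  by_cases hsw : PySem.Chars.startswith (PySem.Chars.strip ((PySem.Chars.strip line.toList).dropWhile (fun ch => ch == '#'))) "@param".toList = true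
  · simp only [hsw, if_true]
    have hsplit := PySem.Str.split₀Max_map_toList (PySem.Str.strip (String.ofList ((PySem.Str.strip line).toList.dropWhile (fun ch => ch == '#')))) 2
    rw [h3] at hsplit
    rcases hp : PySem.Str.split₀Max (PySem.Str.strip (String.ofList ((PySem.Str.strip line).toList.dropWhile (fun ch => ch == '#')))) 2 with _ | ⟨p0, _ | ⟨p1, rest⟩⟩
    · rw [hp] at hsplit; rw [← hsplit]; simp
    · rw [hp] at hsplit; rw [← hsplit]; simp
    · rw [hp] at hsplit; rw [← hsplit]; simp
  · simp only [hsw]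
    simp

-- ===== VERDICT (by name: the statement is the Claim_ definition above) =====
theorem extract_bash_inputs_py_spec : Claim_equal_extract_bash_inputs_py := by
  intro comments _
  unfold Spec_extract_bash_inputs_py extract_bash_inputs_py extract_bash_inputs_py_alt
  cases comments with
  | none => rfl
  | some c =>
    by_cases hc : c = ""
    · simp [hc]
    · simp only [hc, if_false]
      have hstep : (fun (inputs : List String) (line : String) =>
          let line1 := PySem.Str.strip line
          let line2 := String.ofList (line1.toList.dropWhile (fun ch => ch == '#'))
          let line3 := PySem.Str.strip line2
          if PySem.Str.startswith line3 "@param" then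
            match PySem.Str.split₀Max line3 2 with
            | _ :: p1 :: _ => inputs ++ [p1 ++ ": string"]
            | _ => inputs
          else inputs)
          = (fun inputs line => inputs ++ ((aName line.toList).map (fun n => String.ofList n ++ ": string")).toList) := by
        funext inputs line; exact stepA inputs line
      rw [hstep, foldl_opt_toList]
      simp only [List.nil_append]
      apply List.filterMap_congr
      intro line _
      rw [aName_eq]
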